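-- pv_equiv track=rewrite | github.com/HaykLach/commerce-lead-engine | apps/crawler/lead_crawler/services/page_classification_service.py | _sample_urls
-- ===== SOURCE A (Python) =====
-- def _sample_urls(homepage_url: str, links: list[str], max_pages: int) -> list[str]:
--     priority = [
--         "product",
--         "products",
--         "collection",
--         "category",
--         "shop",
--         "cart",
--         "checkout",
--     ]
--
--     unique_links = list(dict.fromkeys([homepage_url] + links))
--     prioritized = sorted(
--         unique_links,
--         key=lambda url: (
--             0 if url == homepage_url else 1,
--             min((url.lower().find(token) for token in priority if token in url.lower()), default=9999),
--             len(url),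
--         ),
--     )
--
--     return prioritized[: max(1, max_pages)]
-- ===== SOURCE B (Python) =====
-- def _sample_urls(homepage_url: str, links: list[str], max_pages: int) -> list[str]:
--     priority = [
--         "product",
--         "products",
--         "collection",
--         "category",
--         "shop",
--         "cart",
--         "checkout",
--     ]
--
--     def key(url):
--         low = url.lower()
--         best = None
--         for token in priority:
--             pos = low.find(token)
--             if pos != -1 and (best is None or pos < best):
--                 best = pos
--         return (0 if url == homepage_url else 1, 9999 if best is None else best, len(url))
--
--     k = max(1, max_pages)
--     keys = []  # keys[i] == key(top[i]); kept in non-decreasing order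
--     top = []   # at most k urls; stable: a later url goes after earlier ones with an equal key
--     for url in list(dict.fromkeys([homepage_url] + links)):
--         ku = key(url)
--         lo, hi = 0, len(keys)
--         while lo < hi:  # binary search for the rightmost position with keys[:lo] all <= ku
--             mid = (lo + hi) // 2
--             if keys[mid] <= ku:
--                 lo = mid + 1
--             else:
--                 hi = mid
--         keys.insert(lo, ku)
--         top.insert(lo, url)
--         del keys[k:]
--         del top[k:]
--     return top
-- ===== Notes on version B (the rewrite author's own statement) =====
-- stated objective: alternative
-- what changed: B replaces A's full stable sort of all deduped URLs followed by slicing with a single pass that maintains a size-bounded top-k buffer: keys are computed once per URL (best-position scan instead of min(generator, default=9999)), the insertion point is found by a hand-rolled binary search on a parallel cached-key list, and both lists are truncated to k after each insert.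
import Mathlib
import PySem

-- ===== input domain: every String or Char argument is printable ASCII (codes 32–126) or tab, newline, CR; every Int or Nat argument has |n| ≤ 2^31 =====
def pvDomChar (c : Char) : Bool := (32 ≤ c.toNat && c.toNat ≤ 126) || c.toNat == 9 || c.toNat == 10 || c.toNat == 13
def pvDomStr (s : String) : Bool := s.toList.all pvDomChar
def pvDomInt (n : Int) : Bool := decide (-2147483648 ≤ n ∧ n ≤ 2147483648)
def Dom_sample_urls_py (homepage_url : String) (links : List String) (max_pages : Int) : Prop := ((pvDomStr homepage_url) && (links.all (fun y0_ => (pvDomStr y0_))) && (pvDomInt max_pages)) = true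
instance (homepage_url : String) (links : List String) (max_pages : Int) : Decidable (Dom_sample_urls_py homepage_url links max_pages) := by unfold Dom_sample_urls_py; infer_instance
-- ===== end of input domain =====

-- B replaces A's full stable sort-then-slice of the deduped links by a single pass that maintains a
-- size-bounded, key-ordered top-k buffer (insert into position, truncate); same return value.

-- the priority token list (shared literal of both Pythons)
def pvPriority : List String :=
  ["product", "products", "collection", "category", "shop", "cart", "checkout"]

-- Python's '<' and '<=' on int 3-tuples: lexicographic, components compared explicitly
def pvLt (p q : Int × Int × Int) : Bool :=
  decide (p.1 < q.1 ∨ (p.1 = q.1 ∧ (p.2.1 < q.2.1 ∨ (p.2.1 = q.2.1 ∧ p.2.2 < q.2.2))))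
def pvLe (p q : Int × Int × Int) : Bool :=
  decide (p.1 < q.1 ∨ (p.1 = q.1 ∧ (p.2.1 < q.2.1 ∨ (p.2.1 = q.2.1 ∧ p.2.2 ≤ q.2.2))))

-- ===== PORT A =====
-- A's sort key lambda: (0 if url == homepage_url else 1,
--                       min((url.lower().find(t) for t in priority if t in url.lower()), default=9999),
--                       len(url))
def pvKeyA (homepage_url url : String) : Int × Int × Int :=
  ((if url = homepage_url then (0 : Int) else 1),
    PySem.List.minD
      ((pvPriority.filter (fun token => PySem.Str.isIn token (PySem.Str.lower url))).map
        (fun token => PySem.Str.find (PySem.Str.lower url) token))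
      (fun v => v) 9999,
    PySem.Str.len url)

def sample_urls_py (homepage_url : String) (links : List String) (max_pages : Int) : List String :=
  let unique_links := PySem.List.dedup (homepage_url :: links)
  -- sorted(unique_links, key=...): PySem.List.sorted's stable insertBy fold, with the tuple
  -- key's lexicographic '<' spelled out component by component (PySem.List.sorted_eq_foldl_insertBy)
  let prioritized := unique_links.foldl
    (fun acc x =>
      PySem.List.insertBy (fun a b => pvLt (pvKeyA homepage_url a) (pvKeyA homepage_url b)) x acc) []
  PySem.List.slice prioritized none (some (max 1 max_pages))

-- ===== PORT B =====
-- B's key helper: one pass over the tokens tracking the best (smallest) found position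
def pvKeyB (homepage_url url : String) : Int × Int × Int :=
  let low := PySem.Str.lower url
  let best := pvPriority.foldl
    (fun best token =>
      let pos := PySem.Str.find low token
      if pos = -1 then best
      else match best with
        | none => some pos
        | some b => if pos < b then some pos else best) none
  ((if url = homepage_url then (0 : Int) else 1),
    (match best with | none => 9999 | some b => b),
    PySem.Str.len url)

-- B's hand-rolled bisect-right loop 'while lo < hi: mid=(lo+hi)//2; ...' ; mid is written out as
-- (lo+hi)/2 (Python's // on the nonnegative ints lo, hi); keys[mid] is read with getD — the loop
-- keeps lo ≤ mid < hi ≤ len(keys), so the index is always in range, exactly as in the Python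
def pvBS (keys : List (Int × Int × Int)) (ku : Int × Int × Int) (lo hi : Nat) : Nat :=
  if _h : lo < hi then
    if pvLe (keys.getD ((lo + hi) / 2) (0, 0, 0)) ku then pvBS keys ku ((lo + hi) / 2 + 1) hi
    else pvBS keys ku lo ((lo + hi) / 2)
  else lo
termination_by hi - lo
decreasing_by all_goals omega

def sample_urls_py_alt (homepage_url : String) (links : List String) (max_pages : Int) : List String :=
  -- state = (keys, top); keys.insert(lo, ku); top.insert(lo, url); del xs[k:] leaves xs[:k]
  ((PySem.List.dedup (homepage_url :: links)).foldl
    (fun (st : List (Int × Int × Int) × List String) url =>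
      let ku := pvKeyB homepage_url url
      let pos := pvBS st.1 ku 0 st.1.length
      (PySem.List.slice (PySem.List.insert st.1 (pos : Int) ku) none (some (max 1 max_pages)),
       PySem.List.slice (PySem.List.insert st.2 (pos : Int) url) none (some (max 1 max_pages))))
    ([], [])).2

-- ===== PRECONDITION & SPEC =====
def Spec_sample_urls_py (homepage_url : String) (links : List String) (max_pages : Int) (out : List String) : Prop := out = sample_urls_py_alt homepage_url links max_pages
instance (homepage_url : String) (links : List String) (max_pages : Int) (out : List String) : Decidable (Spec_sample_urls_py homepage_url links max_pages out) := by unfold Spec_sample_urls_py; infer_instance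

-- ===== CLAIM (what is proved, stated in full; the proofs are below) =====
def Claim_equal_sample_urls_py : Prop := ∀ (homepage_url : String) (links : List String) (max_pages : Int), Dom_sample_urls_py homepage_url links max_pages → Spec_sample_urls_py homepage_url links max_pages (sample_urls_py homepage_url links max_pages)

-- ===== LEMMAS AND PROOFS =====

-- Python's tuple 'p <= q' is the negation of 'q < p'
theorem pvLe_eq_not_lt (p q : Int × Int × Int) : pvLe p q = !pvLt q p := by
  simp only [pvLe, pvLt]
  by_cases h : (q.1 < p.1 ∨ (q.1 = p.1 ∧ (q.2.1 < p.2.1 ∨ (q.2.1 = p.2.1 ∧ q.2.2 < p.2.2))))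
  · simp only [h, decide_true, Bool.not_true, decide_eq_false_iff_not]
    omega
  · simp only [h, decide_false, Bool.not_false, decide_eq_true_iff]
    omega

theorem pvLe_trans (a b c : Int × Int × Int) (h1 : pvLe a b = true) (h2 : pvLe b c = true) :
    pvLe a c = true := by
  simp only [pvLe, decide_eq_true_iff] at *
  omega

theorem pvLt_le (a b : Int × Int × Int) (h : pvLt a b = true) : pvLe a b = true := by
  simp only [pvLe, pvLt, decide_eq_true_iff] at *
  omega

-- B's best-position fold computes min? of A's filtered/mapped find list (g = find, p = membership)
theorem pvBest_eq_min? (g : String → Int) (p : String → Bool)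
    (hpg : ∀ t, p t = true ↔ g t ≠ -1) (ts : List String) (b : Option Int) :
    ts.foldl
      (fun best token =>
        if g token = -1 then best
        else
          match best with
          | none => some (g token)
          | some m => if g token < m then some (g token) else best) b
    = ((ts.filter p).map g).foldl
        (fun acc x =>
          match acc with
          | none => some x
          | some m => if x < m then some x else some m) b := by
  induction ts generalizing b with
  | nil => rfl
  | cons t ts ih =>
    simp only [List.foldl_cons, List.filter_cons]
    by_cases h : g t = -1
    · have hp : p t = false := by
        cases hx : p t
        · rfl
        · exact absurd h ((hpg t).mp hx)
      simp only [h, hp, Bool.false_eq_true, if_false]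
      exact ih b
    · have hp : p t = true := (hpg t).mpr h
      simp only [h, hp, if_true, List.map_cons, List.foldl_cons]
      cases b with
      | none => exact ih _
      | some m => exact ih _

-- a 'match' over Option vs .getD (the 9999 default of A's min)
theorem pvMatch_getD (o : Option Int) :
    (match o with | none => (9999 : Int) | some b => b) = o.getD 9999 := by
  cases o <;> rfl

-- the two key functions agree
theorem pvKey_eq (homepage_url url : String) : pvKeyB homepage_url url = pvKeyA homepage_url url := by
  simp only [pvKeyA, pvKeyB, PySem.List.minD, PySem.List.min?]
  rw [pvBest_eq_min? (fun token => PySem.Str.find (PySem.Str.lower url) token)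
        (fun token => PySem.Str.isIn token (PySem.Str.lower url))
        (fun t => by
          simp [PySem.Str.isIn, PySem.Str.find, PySem.Chars.isIn_iff_infix,
            PySem.Chars.find_ne_neg_one_iff])
        pvPriority none, pvMatch_getD]
  refine congrArg (fun z : Int =>
    ((if url = homepage_url then (0 : Int) else 1), z, PySem.Str.len url)) ?_
  refine congrArg (fun o : Option Int => o.getD 9999) ?_
  refine congrFun (congrFun (congrArg List.foldl ?_) none) _
  funext acc x
  cases acc <;> rfl

-- insertBy with the '<' test scans past exactly the elements whose key is ≤ the new key
theorem pvInsertBy_eq_takeWhile (kf : String → Int × Int × Int) (x : String) (l : List String) :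
    PySem.List.insertBy (fun a b => pvLt (kf a) (kf b)) x l
      = l.takeWhile (fun y => pvLe (kf y) (kf x)) ++ x :: l.dropWhile (fun y => pvLe (kf y) (kf x)) := by
  induction l with
  | nil => rfl
  | cons y ys ih =>
    unfold PySem.List.insertBy
    rw [List.takeWhile_cons, List.dropWhile_cons, pvLe_eq_not_lt]
    cases h : pvLt (kf x) (kf y) with
    | true => simp
    | false => simp [ih]

-- the length of a takeWhile prefix, characterised by its boundary
theorem pvTW_len {α : Type} (q : α → Bool) (l : List α) (m : Nat) (hm : m ≤ l.length)
    (h1 : ∀ i (h : i < m), q (l[i]'(lt_of_lt_of_le h hm)) = true)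
    (h2 : ∀ h : m < l.length, q (l[m]'h) = false) :
    (l.takeWhile q).length = m := by
  induction l generalizing m with
  | nil =>
    simp only [List.length_nil, Nat.le_zero] at hm
    subst hm
    rfl
  | cons a l ih =>
    cases m with
    | zero =>
      have h0 : q a = false := h2 (by simp)
      simp [h0]
    | succ m =>
      have ha : q a = true := h1 0 (Nat.succ_pos m)
      simp only [List.takeWhile_cons, ha, if_true, List.length_cons]
      have := ih m (by simpa using hm)
        (fun i h => h1 (i + 1) (by omega))
        (fun h => h2 (by simpa using h))
      omega

-- in a key-sorted list, the '≤ ku' test is prefix-closed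
theorem pvPrefixClosed (kf : String → Int × Int × Int) (ku : Int × Int × Int) (l : List String)
    (hP : l.Pairwise (fun a b => pvLe (kf a) (kf b) = true))
    (i j : Nat) (hij : i ≤ j) (hj : j < l.length) (hq : pvLe (kf (l[j]'hj)) ku = true) :
    pvLe (kf (l[i]'(lt_of_le_of_lt hij hj))) ku = true := by
  rcases Nat.lt_or_ge i j with h | h
  · exact pvLe_trans _ _ _ (List.pairwise_iff_getElem.mp hP i j _ hj h) hq
  · have hji : i = j := by omega
    subst hji
    exact hq

-- the binary search returns the length of the '≤ ku' prefix of the key-sorted buffer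
theorem pvBS_spec (kf : String → Int × Int × Int) (ku : Int × Int × Int) (l : List String)
    (hP : l.Pairwise (fun a b => pvLe (kf a) (kf b) = true)) :
    ∀ (d lo hi : Nat), hi - lo ≤ d → lo ≤ hi → hi ≤ l.length →
      (∀ i (h : i < l.length), i < lo → pvLe (kf (l[i]'h)) ku = true) →
      (∀ i (h : i < l.length), hi ≤ i → pvLe (kf (l[i]'h)) ku = false) →
      pvBS (l.map kf) ku lo hi = (l.takeWhile (fun y => pvLe (kf y) ku)).length := by
  intro d
  induction d with
  | zero =>
    intro lo hi hd hlh hhl hpre hpost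
    have heq : lo = hi := by omega
    subst heq
    unfold pvBS
    rw [dif_neg (by omega)]
    refine (pvTW_len _ l lo (by omega) (fun i h => hpre i (by omega) h) (fun h => hpost lo h (le_refl lo))).symm
  | succ d ih =>
    intro lo hi hd hlh hhl hpre hpost
    by_cases hlt : lo < hi
    · have hmidlt : (lo + hi) / 2 < l.length := by omega
      unfold pvBS
      rw [dif_pos hlt]
      have hg : (List.map kf l).getD ((lo + hi) / 2) (0, 0, 0) = kf (l[(lo + hi) / 2]'hmidlt) := by
        simp [List.getD, hmidlt]
      rw [hg]
      by_cases hq : pvLe (kf (l[(lo + hi) / 2]'hmidlt)) ku = true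
      · rw [if_pos hq]
        exact ih ((lo + hi) / 2 + 1) hi (by omega) (by omega) hhl
          (fun i h hi2 => pvPrefixClosed kf ku l hP i ((lo + hi) / 2) (by omega) hmidlt hq)
          hpost
      · rw [if_neg hq]
        refine ih lo ((lo + hi) / 2) (by omega) (by omega) (by omega) hpre ?_
        intro i h hmidi
        cases hqi : pvLe (kf (l[i]'h)) ku
        · rfl
        · exact absurd (pvPrefixClosed kf ku l hP ((lo + hi) / 2) i hmidi h hqi) hq
    · have heq : lo = hi := by omega
      subst heq
      unfold pvBS
      rw [dif_neg (by omega)]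
      refine (pvTW_len _ l lo (by omega) (fun i h => hpre i (by omega) h) (fun h => hpost lo h (le_refl lo))).symm

-- the binary search at the buffer, specialised: position = length of the '≤ new key' prefix
theorem pvPos_eq (kf : String → Int × Int × Int) (x : String) (t : List String)
    (hP : t.Pairwise (fun a b => pvLe (kf a) (kf b) = true)) :
    pvBS (t.map kf) (kf x) 0 (t.map kf).length
      = (t.takeWhile (fun y => pvLe (kf y) (kf x))).length := by
  rw [List.length_map]
  exact pvBS_spec kf (kf x) t hP t.length 0 t.length (by omega) (by omega) (le_refl _)
    (fun i h hi0 => absurd hi0 (Nat.not_lt_zero i))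
    (fun i h hle => absurd h (by omega))

-- takeWhile/dropWhile as take/drop at the prefix length
theorem pvTake_tw {α : Type} (q : α → Bool) (t : List α) :
    t.takeWhile q = t.take (t.takeWhile q).length :=
  List.prefix_iff_eq_take.mp (List.takeWhile_prefix q)

theorem pvDrop_dw {α : Type} (q : α → Bool) (t : List α) :
    t.dropWhile q = t.drop (t.takeWhile q).length := by
  have h := congrArg (List.drop (t.takeWhile q).length)
    (List.takeWhile_append_dropWhile (p := q) (l := t))
  rw [List.drop_left] at h
  exact h

-- top.insert(pos, url) at the searched position is exactly the sorted-insert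
theorem pvInsertTop_eq (kf : String → Int × Int × Int) (x : String) (t : List String) :
    PySem.List.insert t (((t.takeWhile (fun y => pvLe (kf y) (kf x))).length : Nat) : Int) x
      = PySem.List.insertBy (fun a b => pvLt (kf a) (kf b)) x t := by
  rw [PySem.List.insert_natCast t _ x (List.takeWhile_prefix _).length_le,
    pvInsertBy_eq_takeWhile, ← pvTake_tw, ← pvDrop_dw]

-- keys.insert(pos, ku) keeps keys = map key top
theorem pvInsertKeys_eq (kf : String → Int × Int × Int) (x : String) (t : List String) :
    PySem.List.insert (t.map kf) (((t.takeWhile (fun y => pvLe (kf y) (kf x))).length : Nat) : Int) (kf x)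
      = (PySem.List.insertBy (fun a b => pvLt (kf a) (kf b)) x t).map kf := by
  have h1 := congrArg (List.map kf) (pvTake_tw (fun y => pvLe (kf y) (kf x)) t)
  rw [List.map_take] at h1
  have h2 := congrArg (List.map kf) (pvDrop_dw (fun y => pvLe (kf y) (kf x)) t)
  rw [List.map_drop] at h2
  rw [PySem.List.insert_natCast (t.map kf) _ (kf x)
      (by rw [List.length_map]; exact (List.takeWhile_prefix _).length_le),
    pvInsertBy_eq_takeWhile, List.map_append, List.map_cons, h1, h2]

-- the sorted-insert keeps the buffer key-sorted
theorem pvInsertBy_pairwise (kf : String → Int × Int × Int) (x : String) (l : List String)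
    (hP : l.Pairwise (fun a b => pvLe (kf a) (kf b) = true)) :
    (PySem.List.insertBy (fun a b => pvLt (kf a) (kf b)) x l).Pairwise
      (fun a b => pvLe (kf a) (kf b) = true) := by
  induction l with
  | nil => simp [PySem.List.insertBy]
  | cons y ys ih =>
    rw [List.pairwise_cons] at hP
    obtain ⟨hy, hys⟩ := hP
    unfold PySem.List.insertBy
    cases h : pvLt (kf x) (kf y) with
    | true =>
      rw [if_pos rfl]
      refine List.Pairwise.cons ?_ (List.Pairwise.cons hy hys)
      intro z hz
      rcases List.mem_cons.mp hz with hz | hz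
      · subst hz; exact pvLt_le _ _ h
      · exact pvLe_trans _ _ _ (pvLt_le _ _ h) (hy z hz)
    | false =>
      rw [if_neg (by simp)]
      refine List.Pairwise.cons ?_ (ih hys)
      intro z hz
      rcases (PySem.List.mem_insertBy _ x z ys).mp hz with hz | hz
      · subst hz
        rw [pvLe_eq_not_lt, h]
        rfl
      · exact hy z hz

-- inserting into a truncated buffer and re-truncating = truncating the full insertion
theorem pvInsert_take {α : Type} (bf : α → α → Bool) (x : α) (l : List α) (k : Nat) :
    (PySem.List.insertBy bf x (l.take k)).take k = (PySem.List.insertBy bf x l).take k := by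
  induction l generalizing k with
  | nil => simp
  | cons y ys ih =>
    cases k with
    | zero => simp
    | succ j =>
      simp only [List.take_succ_cons]
      unfold PySem.List.insertBy
      by_cases h : bf x y = true
      · simp only [h, if_true, List.take_succ_cons]
        cases j with
        | zero => simp
        | succ i =>
          simp only [List.take_succ_cons, List.take_take]
          have hmin : min i (i + 1) = i := by omega
          rw [hmin]
      · simp only [h, Bool.false_eq_true, if_false, List.take_succ_cons]
        rw [ih j]

-- the bounded two-list fold computes take k of the insertion-sort fold (plus its key shadow)
theorem pvFoldBS (kf : String → Int × Int × Int) (k : Nat) (xs : List String) :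
    ∀ acc : List String, acc.Pairwise (fun a b => pvLe (kf a) (kf b) = true) →
      xs.foldl (fun (st : List (Int × Int × Int) × List String) url =>
          ((PySem.List.insert st.1 ((pvBS st.1 (kf url) 0 st.1.length : Nat) : Int) (kf url)).take k,
           (PySem.List.insert st.2 ((pvBS st.1 (kf url) 0 st.1.length : Nat) : Int) url).take k))
        ((acc.take k).map kf, acc.take k)
      = (((xs.foldl (fun a x => PySem.List.insertBy (fun a b => pvLt (kf a) (kf b)) x a) acc).take k).map kf,
         (xs.foldl (fun a x => PySem.List.insertBy (fun a b => pvLt (kf a) (kf b)) x a) acc).take k) := by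
  induction xs with
  | nil => intro acc _; rfl
  | cons x xs ih =>
    intro acc hacc
    have ht : (acc.take k).Pairwise (fun a b => pvLe (kf a) (kf b) = true) :=
      List.Pairwise.sublist (List.take_sublist k acc) hacc
    simp only [List.foldl_cons]
    have hpos : pvBS ((acc.take k).map kf) (kf x) 0 ((acc.take k).map kf).length
        = ((acc.take k).takeWhile (fun y => pvLe (kf y) (kf x))).length := pvPos_eq kf x _ ht
    have hstate :
        ((PySem.List.insert ((acc.take k).map kf)
            ((pvBS ((acc.take k).map kf) (kf x) 0 ((acc.take k).map kf).length : Nat) : Int) (kf x)).take k,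
         (PySem.List.insert (acc.take k)
            ((pvBS ((acc.take k).map kf) (kf x) 0 ((acc.take k).map kf).length : Nat) : Int) x).take k)
        = ((((PySem.List.insertBy (fun a b => pvLt (kf a) (kf b)) x acc).take k).map kf),
           (PySem.List.insertBy (fun a b => pvLt (kf a) (kf b)) x acc).take k) := by
      rw [hpos, pvInsertKeys_eq, pvInsertTop_eq, pvInsert_take, ← List.map_take, pvInsert_take]
    rw [hstate]
    exact ih (PySem.List.insertBy (fun a b => pvLt (kf a) (kf b)) x acc)
      (pvInsertBy_pairwise kf x acc hacc)

-- ===== VERDICT (by name: the statement is the Claim_ definition above) =====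
theorem sample_urls_py_spec : Claim_equal_sample_urls_py := by
  intro homepage_url links max_pages _
  unfold Spec_sample_urls_py sample_urls_py sample_urls_py_alt
  have hk : (0 : Int) ≤ max 1 max_pages := le_trans (by norm_num) (le_max_left 1 max_pages)
  have hkey : pvKeyB homepage_url = pvKeyA homepage_url := funext (pvKey_eq homepage_url)
  have hstep : (fun (st : List (Int × Int × Int) × List String) url =>
      let ku := pvKeyB homepage_url url
      let pos := pvBS st.1 ku 0 st.1.length
      (PySem.List.slice (PySem.List.insert st.1 (pos : Int) ku) none (some (max 1 max_pages)),
       PySem.List.slice (PySem.List.insert st.2 (pos : Int) url) none (some (max 1 max_pages))))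
      = (fun (st : List (Int × Int × Int) × List String) url =>
        ((PySem.List.insert st.1
            ((pvBS st.1 (pvKeyA homepage_url url) 0 st.1.length : Nat) : Int)
            (pvKeyA homepage_url url)).take (max 1 max_pages).toNat,
         (PySem.List.insert st.2
            ((pvBS st.1 (pvKeyA homepage_url url) 0 st.1.length : Nat) : Int)
            url).take (max 1 max_pages).toNat)) := by
    funext st url
    rw [hkey]
    simp only [PySem.List.slice_to _ hk]
  rw [PySem.List.slice_to _ hk, hstep]
  have hmain := pvFoldBS (pvKeyA homepage_url) (max 1 max_pages).toNat
    (PySem.List.dedup (homepage_url :: links)) [] List.Pairwise.nil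
  simp only [List.take_nil, List.map_nil] at hmain
  rw [hmain]
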